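-- pv_equiv track=rewrite | github.com/danielmast/advent-of-code-2023 | day21/day21_2.py | fill_area
-- ===== SOURCE A (Python) =====
-- def fill_area(area, locs, R, C):
--     filled = []
--     for r in range(R):
--         line = ''
--         for c in range(C):
--             if (r, c) in locs:
--                 line += '0'
--             else:
--                 if area[r][c] == '.':
--                     line += ','
--                 else:
--                     line += area[r][c]
--         filled.append(line)
--     return filled
-- ===== SOURCE B (Python) =====
-- def fill_area(area, locs, R, C):
--     grid = [[',' if area[r][c] == '.' else area[r][c] for c in range(C)] for r in range(R)]
--     for r, c in locs:
--         if 0 <= r < R and 0 <= c < C: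
--             grid[r][c] = '0'
--     return [''.join(row) for row in grid]
-- ===== Notes on version B (the rewrite author's own statement) =====
-- stated objective: alternative
-- what changed: Instead of testing every (r,c) cell for membership in locs while building each line, B first translates the whole grid in one pass ('.' -> ','), then stamps '0' only at the in-bounds coordinates of locs, and joins the rows at the end.
-- outside the precondition, e.g. on fill_area([['x']], {(0, 1)}, 1, 2): A returns ['x0'], B raises IndexError; on fill_area([[]], {(0, 0)}, 1, 1): A returns ['0'], B raises IndexError
import Mathlib
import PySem

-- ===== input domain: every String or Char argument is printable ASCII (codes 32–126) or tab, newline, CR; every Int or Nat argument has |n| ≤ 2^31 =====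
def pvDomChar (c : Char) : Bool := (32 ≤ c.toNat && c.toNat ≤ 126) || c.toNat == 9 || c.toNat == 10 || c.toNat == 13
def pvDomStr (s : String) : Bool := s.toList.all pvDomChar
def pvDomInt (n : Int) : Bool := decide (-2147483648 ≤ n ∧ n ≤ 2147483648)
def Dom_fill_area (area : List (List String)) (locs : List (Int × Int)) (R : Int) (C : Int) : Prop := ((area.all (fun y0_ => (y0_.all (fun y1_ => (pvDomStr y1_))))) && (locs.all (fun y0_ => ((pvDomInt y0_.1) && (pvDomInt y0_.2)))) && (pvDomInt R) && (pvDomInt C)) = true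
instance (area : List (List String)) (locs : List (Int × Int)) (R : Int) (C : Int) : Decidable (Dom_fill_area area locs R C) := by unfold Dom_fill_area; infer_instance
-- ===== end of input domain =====

-- B replaces A's per-cell membership scan of `locs` by a translate-then-stamp pass:
-- translate the grid once ('.' -> ','), stamp '0' at each in-bounds location of locs, join rows.


-- ===== PORT A =====
def fill_area (area : List (List String)) (locs : List (Int × Int)) (R : Int) (C : Int) : List String :=
  (PySem.List.pyRange 0 R 1).foldl (fun filled r =>
    filled ++ [(PySem.List.pyRange 0 C 1).foldl (fun line c =>
      if (r, c) ∈ locs then line ++ "0"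
      else if PySem.List.pyGetD (PySem.List.pyGetD area r []) c "" = "." then line ++ ","
      else line ++ PySem.List.pyGetD (PySem.List.pyGetD area r []) c "") ""]) []

-- ===== PORT B =====
-- '.' becomes ',', everything else is kept
def pvTr (cell : String) : String := if cell = "." then "," else cell

-- one stamping step: write "0" at an in-bounds location, ignore out-of-bounds ones
def pvStamp (nr nc : Int) (g : List (List String)) (rc : Int × Int) : List (List String) :=
  if 0 ≤ rc.1 ∧ rc.1 < nr ∧ 0 ≤ rc.2 ∧ rc.2 < nc then
    g.modify rc.1.toNat (fun row => row.set rc.2.toNat "0")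
  else g

def fill_area_alt (area : List (List String)) (locs : List (Int × Int)) (R : Int) (C : Int) : List String :=
  let grid := (PySem.List.pyRange 0 R 1).map (fun r =>
    (PySem.List.pyRange 0 C 1).map (fun c =>
      pvTr (PySem.List.pyGetD (PySem.List.pyGetD area r []) c "")))
  (locs.foldl (pvStamp R C) grid).map (fun row => PySem.Str.join "" row)

-- ===== PRECONDITION & SPEC =====
-- Pre_ excludes inputs on which A's inner indexing area[r][c] would raise IndexError, and also
-- the inputs where such a missing cell is masked because (r, c) is in locs (A then still returns,
-- but B's translate pass has no cell to translate there and raises).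
def Pre_fill_area (area : List (List String)) (_locs : List (Int × Int)) (R : Int) (C : Int) : Prop :=
  0 < R → 0 < C → R ≤ (area.length : Int) ∧ ∀ row ∈ area.take R.toNat, C ≤ (row.length : Int)
instance (area : List (List String)) (locs : List (Int × Int)) (R : Int) (C : Int) : Decidable (Pre_fill_area area locs R C) := by unfold Pre_fill_area; infer_instance

def pvWitness_fill_area : List (List String) × (List (Int × Int)) × Int × Int :=
  ([[".", "#"], ["x", "."]], [(0, 0), (1, 1), (5, -3)], 2, 2)

def Spec_fill_area (area : List (List String)) (locs : List (Int × Int)) (R : Int) (C : Int) (out : List String) : Prop := out = fill_area_alt area locs R C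
instance (area : List (List String)) (locs : List (Int × Int)) (R : Int) (C : Int) (out : List String) : Decidable (Spec_fill_area area locs R C out) := by unfold Spec_fill_area; infer_instance

-- ===== CLAIM (what is proved, stated in full; the proofs are below) =====
def Claim_equal_fill_area : Prop := ∀ (area : List (List String)) (locs : List (Int × Int)) (R : Int) (C : Int), Dom_fill_area area locs R C → Pre_fill_area area locs R C → Spec_fill_area area locs R C (fill_area area locs R C)

-- ===== LEMMAS AND PROOFS =====

theorem pv_flat_inter (l : List (List Char)) :
    (List.intersperse ([] : List Char) l).flatten = l.flatten := by
  induction l with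
  | nil => rfl
  | cons a t ih =>
    cases t with
    | nil => rfl
    | cons b t' => rw [List.intersperse_cons₂]; simpa using ih

theorem pv_join_cons (s : String) (ps : List String) :
    PySem.Str.join "" (s :: ps) = s ++ PySem.Str.join "" ps := by
  rw [← String.toList_inj]
  simp [PySem.Str.toList_join, PySem.Chars.join, List.intercalate, pv_flat_inter]

theorem pv_foldl_str {α : Type} (g : α → String) (cs : List α) (init : String) :
    cs.foldl (fun line c => line ++ g c) init = init ++ PySem.Str.join "" (cs.map g) := by
  have h0 : PySem.Str.join "" ([] : List String) = "" := rfl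
  induction cs generalizing init with
  | nil => simp [h0]
  | cons c cs ih => simp [ih, pv_join_cons, String.append_assoc]

-- A computes the r-th row as a join over the column range
theorem pv_A_eq_map (area : List (List String)) (locs : List (Int × Int)) (R C : Int) :
    fill_area area locs R C =
      (List.range R.toNat).map (fun (i : Nat) =>
        PySem.Str.join "" ((List.range C.toNat).map (fun (j : Nat) =>
          if ((i : Int), (j : Int)) ∈ locs then "0"
          else pvTr ((area.getD i []).getD j "")))) := by
  unfold fill_area
  rw [PySem.List.foldl_append_singleton_eq_map, PySem.List.pyRange_one 0 R,
      PySem.List.pyRange_one 0 C]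
  simp only [Int.sub_zero, List.map_map, List.nil_append]
  apply List.map_congr_left
  intro i _
  simp only [Function.comp_apply, zero_add]
  have hfun : (fun (line : String) (c : Int) =>
      if ((i : Int), c) ∈ locs then line ++ "0"
      else if PySem.List.pyGetD (PySem.List.pyGetD area (i : Int) []) c "" = "." then line ++ ","
      else line ++ PySem.List.pyGetD (PySem.List.pyGetD area (i : Int) []) c "")
      = (fun (line : String) (c : Int) => line ++
          (if ((i : Int), c) ∈ locs then "0"
           else pvTr (PySem.List.pyGetD (PySem.List.pyGetD area (i : Int) []) c ""))) := by
    funext line c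
    simp only [pvTr]
    split_ifs <;> rfl
  rw [hfun, pv_foldl_str]
  simp only [List.map_map]
  have h0 : ∀ t : String, "" ++ t = t := fun t => by
    rw [← String.toList_inj]; simp
  rw [h0]
  congr 1
  apply List.map_congr_left
  intro j _
  simp [PySem.List.pyGetD_natCast]

theorem pv_stamp_len (nr nc : Int) (locs : List (Int × Int)) (g : List (List String)) :
    (locs.foldl (pvStamp nr nc) g).length = g.length := by
  induction locs generalizing g with
  | nil => rfl
  | cons rc ls ih =>
    rw [List.foldl_cons, ih]
    unfold pvStamp
    split_ifs <;> simp

theorem pv_stamp_row_len (nr nc : Int) (locs : List (Int × Int)) (g : List (List String)) (i : Nat) :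
    ((locs.foldl (pvStamp nr nc) g).getD i []).length = (g.getD i []).length := by
  induction locs generalizing g with
  | nil => rfl
  | cons rc ls ih =>
    rw [List.foldl_cons, ih]
    unfold pvStamp
    split_ifs with h
    · by_cases hi : i < g.length
      · by_cases heq : rc.1.toNat = i
        · simp [hi, heq]
        · simp [hi, heq]
      · simp [List.getD, List.getElem?_eq_none (by simpa using Nat.le_of_not_lt hi),
              List.getElem?_eq_none (l := g.modify rc.1.toNat _) (by simpa using Nat.le_of_not_lt hi)]
    · rfl

theorem pv_stamp_get (nr nc : Int) (locs : List (Int × Int)) (g : List (List String))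
    (i j : Nat) (hi : (i : Int) < nr) (hj : (j : Int) < nc)
    (hgi : i < g.length) (hgj : j < (g.getD i []).length) :
    ((locs.foldl (pvStamp nr nc) g).getD i []).getD j "" =
      if ((i : Int), (j : Int)) ∈ locs then "0" else (g.getD i []).getD j "" := by
  induction locs generalizing g with
  | nil => simp
  | cons rc ls ih =>
    have hlen : (pvStamp nr nc g rc).length = g.length := by
      unfold pvStamp; split_ifs <;> simp
    have hrowlen : ((pvStamp nr nc g rc).getD i []).length = (g.getD i []).length := by
      unfold pvStamp
      split_ifs with h
      · by_cases heq : rc.1.toNat = i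
        · simp [hgi, heq]
        · simp [hgi, heq]
      · rfl
    rw [List.foldl_cons, ih (pvStamp nr nc g rc) (hlen ▸ hgi) (hrowlen ▸ hgj)]
    have hgj' : j < g[i].length := by rwa [List.getD_eq_getElem _ _ hgi] at hgj
    by_cases hmem : ((i : Int), (j : Int)) ∈ ls
    · simp [hmem]
    · simp only [hmem, if_false, List.mem_cons]
      by_cases hhd : ((i : Int), (j : Int)) = rc
      · -- the head stamps exactly cell (i, j); the guard holds
        have hcond : 0 ≤ rc.1 ∧ rc.1 < nr ∧ 0 ≤ rc.2 ∧ rc.2 < nc := by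
          rw [← hhd]; exact ⟨Int.natCast_nonneg i, hi, Int.natCast_nonneg j, hj⟩
        simp only [hhd, true_or, if_true, pvStamp, hcond, and_self]
        rw [← hhd]
        simp [List.length_modify, hgi, List.getD, hgj']
      · rw [if_neg (by tauto)]
        unfold pvStamp
        split_ifs with hg
        · obtain ⟨h1, h2, h3, h4⟩ := hg
          by_cases hri : rc.1.toNat = i
          · have hci : rc.2.toNat ≠ j := by
              intro hcj
              apply hhd
              obtain ⟨r, c⟩ := rc
              simp only [Prod.mk.injEq]
              simp only at h1 h3 hri hcj
              constructor <;> omega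
            simp [List.length_modify, hgi, hri, List.getD, hci, hgj']
          · simp [hgi, hri, List.length_modify]
        · rfl

-- ===== VERDICT (by name: the statement is the Claim_ definition above) =====
theorem fill_area_spec : Claim_equal_fill_area := by
  intro area locs R C _ _
  unfold Spec_fill_area
  rw [pv_A_eq_map]
  unfold fill_area_alt
  simp only []
  rw [PySem.List.pyRange_one 0 R]
  simp only [Int.sub_zero, List.map_map]
  set grid := (List.range R.toNat).map
    ((fun r => (PySem.List.pyRange 0 C 1).map (fun c =>
        pvTr (PySem.List.pyGetD (PySem.List.pyGetD area r []) c ""))) ∘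
      (fun (k : Nat) => (0 : Int) + (k : Int))) with hgrid
  have hgl : grid.length = R.toNat := by rw [hgrid, List.length_map, List.length_range]
  have hrow : ∀ i, i < R.toNat → grid.getD i [] =
      (List.range C.toNat).map (fun (j : Nat) => pvTr ((area.getD i []).getD j "")) := by
    intro i hiR
    rw [hgrid, List.getD_eq_getElem _ _ (by rw [List.length_map, List.length_range]; exact hiR)]
    simp only [List.getElem_map, List.getElem_range, Function.comp_apply, zero_add]
    rw [PySem.List.pyRange_one 0 C]
    simp only [Int.sub_zero, List.map_map]
    apply List.map_congr_left
    intro j _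
    simp [PySem.List.pyGetD_natCast]
  have hrowlen : ∀ i, i < R.toNat → (grid.getD i []).length = C.toNat := by
    intro i hiR
    rw [hrow i hiR, List.length_map, List.length_range]
  have hsl : (List.foldl (pvStamp R C) grid locs).length = R.toNat := by
    rw [pv_stamp_len, hgl]
  apply List.ext_getElem?
  intro i
  by_cases hiR : i < R.toNat
  · have hrowEq : (List.foldl (pvStamp R C) grid locs).getD i [] =
        (List.range C.toNat).map (fun (j : Nat) =>
          if ((i : Int), (j : Int)) ∈ locs then "0" else pvTr ((area.getD i []).getD j "")) := by
      apply List.ext_getElem?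
      intro j
      by_cases hjC : j < C.toNat
      · have hl1 : j < ((List.foldl (pvStamp R C) grid locs).getD i []).length := by
          rw [pv_stamp_row_len, hrowlen i hiR]; exact hjC
        have hsome : ((List.foldl (pvStamp R C) grid locs).getD i [])[j]? =
            some (((List.foldl (pvStamp R C) grid locs).getD i []).getD j "") := by
          rw [List.getD_eq_getElem _ _ hl1, List.getElem?_eq_getElem hl1]
        rw [hsome, pv_stamp_get R C locs grid i j (by omega) (by omega)
          (by omega) (by rw [hrowlen i hiR]; exact hjC)]
        have hcell : (grid.getD i []).getD j "" = pvTr ((area.getD i []).getD j "") := by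
          rw [hrow i hiR,
              List.getD_eq_getElem _ _ (by rw [List.length_map, List.length_range]; exact hjC)]
          simp only [List.getElem_map, List.getElem_range]
        rw [hcell]
        simp [hjC]
      · rw [List.getElem?_eq_none (by rw [pv_stamp_row_len, hrowlen i hiR]; omega),
            List.getElem?_eq_none (by simp; omega)]
    simp only [List.getElem?_map]
    rw [List.getElem?_range hiR]
    rw [List.getElem?_eq_getElem (by rw [hsl]; exact hiR)]
    simp only [Option.map]
    congr 1
    rw [← List.getD_eq_getElem _ ([] : List String) (by rw [hsl]; exact hiR), hrowEq]
  · rw [List.getElem?_eq_none (by simp; omega),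
        List.getElem?_eq_none (by rw [List.length_map, hsl]; omega)]
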